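-- pv_equiv track=rewrite | github.com/christopher-henderson/Experiments | numberOfLines/lines.py | getNumLines
-- ===== SOURCE A (Python) =====
-- class NormalizedRational(object):
--     '''
--         This class normalizes a point so that any other point that can land
--         on the same line hashes to the same value.
--
--         - All points on the x-axis are converted to (0, 1)
--         - All points on the y-axis are converted to (1, 0)
--         - The origin remains the origin.
--         - All other points have their rational reduced. If the point
--             lies within quadrants III or IV then they are flipped to I or II.
--
--         @param int numerator
--         @param int denominator
--     '''
--     def __init__(self, numerator, denominator):
--         x_axis = numerator == 0 and denominator != 0
--         y_axis = denominator == 0 and numerator != 0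
--         origin = numerator == 0 and denominator == 0
--         if x_axis:
--             self.rational = (0, 1)
--         elif y_axis:
--             self.rational = (1, 0)
--         elif origin:
--             self.rational = (0, 0)
--         else:
--             self.rational = self._normalizeRational(numerator, denominator)
--
--     def _normalizeRational(self, numerator, denominator):
--             #===================================================================
--             # Euclid's algorithm for GCD.
--             # https://en.wikipedia.org/wiki/Euclidean_algorithm
--             # @TODO research a possibly fast approach.
--             #===================================================================
--             GCD = abs(numerator)
--             tempDenominator = abs(denominator)
--             temp = 0
--             while (tempDenominator > 0):
--                 temp = tempDenominator
--                 tempDenominator = GCD % tempDenominator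
--                 GCD = temp
--             return self._foldQuadrantsIIIandIV(numerator//GCD, denominator//GCD)
--
--     def _foldQuadrantsIIIandIV(self, y, x):
--         quadrantIII = y < 0 and x < 0
--         quadrantIV = y < 0 and x > 0
--         if quadrantIII or quadrantIV:
--             return (y*-1, x*-1)
--         else:
--             return (y, x)
--
--     def __eq__(self, other):
--         if not isinstance(other, NormalizedRational):
--             return False
--         return self.rational == other.rational
--
--     def __hash__(self):
--         return hash(self.rational)
--
-- def getNumLines(points):
--     lines = set()
--     for point in points:
--         lines.add(NormalizedRational(point[1], point[0]))
--     if NormalizedRational(0, 0) in lines and len(lines) is not 1: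
--         return len(lines) - 1
--     else:
--         return len(lines)
-- ===== SOURCE B (Python) =====
-- def _same(p, q):
--     po = p == (0, 0)
--     qo = q == (0, 0)
--     if po or qo:
--         return po and qo
--     return p[0] * q[1] == p[1] * q[0]
--
-- def getNumLines(points):
--     count = 0
--     seen = []
--     for p in points:
--         if not any(_same(q, p) for q in seen):
--             count += 1
--         seen.append(p)
--     if (0, 0) in points and count != 1:
--         return count - 1
--     return count
-- ===== Notes on version B (the rewrite author's own statement) =====
-- stated objective: alternative
-- what changed: Drops normalization entirely: instead of reducing each point to a canonical gcd-normalized slope and hashing into a set, B counts points whose line is new by a pairwise cross-product collinearity test (x1*y2 == y1*x2) against the already-seen points.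
import Mathlib
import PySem

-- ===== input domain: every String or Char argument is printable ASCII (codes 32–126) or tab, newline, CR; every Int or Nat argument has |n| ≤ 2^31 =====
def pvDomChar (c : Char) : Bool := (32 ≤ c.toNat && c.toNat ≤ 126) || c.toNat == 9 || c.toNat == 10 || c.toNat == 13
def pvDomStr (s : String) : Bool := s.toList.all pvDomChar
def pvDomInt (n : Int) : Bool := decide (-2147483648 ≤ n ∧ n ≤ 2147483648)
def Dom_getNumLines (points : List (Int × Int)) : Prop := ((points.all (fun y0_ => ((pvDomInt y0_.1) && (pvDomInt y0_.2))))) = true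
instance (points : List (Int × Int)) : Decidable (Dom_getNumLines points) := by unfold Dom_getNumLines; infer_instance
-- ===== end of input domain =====

-- B replaces A's gcd-normalized slope keys and hash set by a pairwise cross-product
-- collinearity test against the already-seen points; an alternative of similar size.

-- ===== PORT A =====
-- while (tempDenominator > 0): temp = tempDenominator; tempDenominator = GCD % tempDenominator; GCD = temp
def gcdLoopA (GCD tempDenominator : Int) : Int :=
  if h : tempDenominator > 0 then
    gcdLoopA tempDenominator (PySem.Int.mod GCD tempDenominator)
  else GCD
termination_by tempDenominator.toNat
decreasing_by
  have h1 := PySem.Int.mod_lt GCD h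
  have h2 := PySem.Int.mod_nonneg GCD h
  omega

def foldQuadrantsA (y x : Int) : Int × Int :=
  if (y < 0 ∧ x < 0) ∨ (y < 0 ∧ x > 0) then (y * (-1), x * (-1)) else (y, x)

def normalizeRationalA (numerator denominator : Int) : Int × Int :=
  let GCD := gcdLoopA |numerator| |denominator|
  foldQuadrantsA (PySem.Int.floordiv numerator GCD) (PySem.Int.floordiv denominator GCD)

-- NormalizedRational.__init__: the `rational` tuple (equality/hash of the object is this tuple)
def keyA (numerator denominator : Int) : Int × Int :=
  if numerator = 0 ∧ denominator ≠ 0 then (0, 1)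
  else if denominator = 0 ∧ numerator ≠ 0 then (1, 0)
  else if numerator = 0 ∧ denominator = 0 then (0, 0)
  else normalizeRationalA numerator denominator

def getNumLines (points : List (Int × Int)) : Int :=
  let lines : PySem.Set (Int × Int) :=
    points.foldl (fun s p => PySem.Set.add s (keyA p.2 p.1)) PySem.Set.empty
  if PySem.Set.contains lines ((0 : Int), (0 : Int)) = true ∧ PySem.Set.len lines ≠ 1 then
    PySem.Set.len lines - 1
  else
    PySem.Set.len lines

-- ===== PORT B =====
def sameLineB (p q : Int × Int) : Bool :=
  if p = ((0 : Int), (0 : Int)) ∨ q = ((0 : Int), (0 : Int)) then decide (p = q)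
  else decide (p.1 * q.2 = p.2 * q.1)

def getNumLines_alt (points : List (Int × Int)) : Int :=
  let st := points.foldl
    (fun (st : Int × List (Int × Int)) p =>
      (if st.2.any (fun q => sameLineB q p) then st.1 else st.1 + 1, st.2 ++ [p]))
    (0, [])
  if ((0 : Int), (0 : Int)) ∈ points ∧ st.1 ≠ 1 then st.1 - 1 else st.1

-- ===== PRECONDITION & SPEC =====
def Spec_getNumLines (points : List (Int × Int)) (out : Int) : Prop := out = getNumLines_alt points
instance (points : List (Int × Int)) (out : Int) : Decidable (Spec_getNumLines points out) := by unfold Spec_getNumLines; infer_instance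

-- ===== CLAIM (what is proved, stated in full; the proofs are below) =====
def Claim_equal_getNumLines : Prop := ∀ (points : List (Int × Int)), Dom_getNumLines points → Spec_getNumLines points (getNumLines points)

-- ===== LEMMAS AND PROOFS =====

-- A's hand-written Euclid loop computes gcd (on nonnegative casts)
lemma gcdLoopA_natCast : ∀ (n m : Nat), gcdLoopA (m : Int) (n : Int) = (Nat.gcd m n : Int) := by
  intro n
  induction n using Nat.strong_induction_on with
  | _ n ih =>
    intro m
    rw [gcdLoopA]
    by_cases h : n = 0
    · subst h
      rw [dif_neg (by simp)]
      simp
    · rw [dif_pos (by exact_mod_cast Nat.pos_of_ne_zero h), PySem.Int.mod_natCast,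
          ih (m % n) (Nat.mod_lt m (Nat.pos_of_ne_zero h)) n]
      rw [Nat.gcd_comm n (m % n), ← Nat.gcd_rec n m, Nat.gcd_comm n m]

lemma normalizeRationalA_eq (y x : Int) :
    normalizeRationalA y x
      = foldQuadrantsA (PySem.Int.floordiv y (gcdLoopA |y| |x|))
          (PySem.Int.floordiv x (gcdLoopA |y| |x|)) := rfl

-- characterization of A's key on a general (both-coordinates-nonzero) point
lemma keyA_props (x y : Int) (hx : x ≠ 0) (hy : y ≠ 0) :
    0 < (keyA y x).1 ∧ (keyA y x).2 ≠ 0 ∧ Int.gcd (keyA y x).1 (keyA y x).2 = 1 ∧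
      (keyA y x).1 * x = (keyA y x).2 * y := by
  unfold keyA
  rw [if_neg (by tauto), if_neg (by tauto), if_neg (by tauto), normalizeRationalA_eq]
  have hg : gcdLoopA |y| |x| = (Int.gcd y x : Int) := by
    rw [Int.abs_eq_natAbs, Int.abs_eq_natAbs, gcdLoopA_natCast]
    rfl
  have hgpos : (0 : Int) < gcdLoopA |y| |x| := by
    rw [hg]
    exact_mod_cast Int.gcd_pos_of_ne_zero_left x hy
  rw [PySem.Int.floordiv_eq_ediv_of_pos hgpos, PySem.Int.floordiv_eq_ediv_of_pos hgpos, hg]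
  set g : Int := (Int.gcd y x : Int) with hgdef
  have hdy : g ∣ y := Int.gcd_dvd_left y x
  have hdx : g ∣ x := Int.gcd_dvd_right y x
  have hyq : y / g * g = y := Int.ediv_mul_cancel hdy
  have hxq : x / g * g = x := Int.ediv_mul_cancel hdx
  have hgne : g ≠ 0 := by omega
  have hyq0 : y / g ≠ 0 := by
    intro h0; rw [h0] at hyq; simp at hyq; exact hy hyq.symm
  have hxq0 : x / g ≠ 0 := by
    intro h0; rw [h0] at hxq; simp at hxq; exact hx hxq.symm
  have hcop : Int.gcd (y / g) (x / g) = 1 :=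
    Int.gcd_div_gcd_div_gcd (Int.gcd_pos_of_ne_zero_left x hy)
  have hcross : y / g * x = x / g * y := by
    calc y / g * x = y / g * (x / g * g) := by rw [hxq]
    _ = x / g * (y / g * g) := by ring
    _ = x / g * y := by rw [hyq]
  unfold foldQuadrantsA
  by_cases hneg : y / g < 0
  · rw [if_pos (by rcases lt_or_gt_of_ne hxq0 with h | h
                   exacts [Or.inl ⟨hneg, h⟩, Or.inr ⟨hneg, h⟩])]
    refine ⟨by simp; omega, by simp [hxq0], ?_, by simp only []; nlinarith [hcross]⟩
    simpa [Int.gcd] using hcop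
  · rw [if_neg (by rintro (⟨h1, _⟩ | ⟨h1, _⟩) <;> exact hneg h1)]
    exact ⟨by omega, hxq0, hcop, hcross⟩

-- the key (0,0) marks exactly the origin
lemma keyA_origin_iff (p : Int × Int) :
    keyA p.2 p.1 = ((0 : Int), (0 : Int)) ↔ p = ((0 : Int), (0 : Int)) := by
  constructor
  · intro h
    by_cases hx : p.1 = 0 <;> by_cases hy : p.2 = 0
    · exact Prod.ext hx hy
    · rw [keyA, if_neg (by tauto), if_pos ⟨hx, hy⟩] at h; simp at h
    · rw [keyA, if_pos ⟨hy, hx⟩] at h; simp at h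
    · obtain ⟨hpos, _, _, _⟩ := keyA_props p.1 p.2 hx hy
      rw [h] at hpos; simp at hpos
  · intro h
    rw [h]
    simp [keyA]

-- unified normal form of a non-origin key: nonnegative coprime pair with the
-- cross relation, first component zero only for the x-axis key (0, 1)
lemma keyA_norm (p : Int × Int) (hp : p ≠ ((0 : Int), (0 : Int))) :
    0 ≤ (keyA p.2 p.1).1 ∧ ((keyA p.2 p.1).1 = 0 → (keyA p.2 p.1).2 = 1) ∧
      Int.gcd (keyA p.2 p.1).1 (keyA p.2 p.1).2 = 1 ∧
      (keyA p.2 p.1).1 * p.1 = (keyA p.2 p.1).2 * p.2 := by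
  by_cases hx : p.1 = 0 <;> by_cases hy : p.2 = 0
  · exact absurd (Prod.ext hx hy) hp
  · rw [keyA, if_neg (by tauto), if_pos ⟨hx, hy⟩]
    refine ⟨by norm_num, by norm_num, by norm_num [Int.gcd], by rw [hx]; ring⟩
  · rw [keyA, if_pos ⟨hy, hx⟩]
    refine ⟨by norm_num, by norm_num, by norm_num [Int.gcd], by rw [hy]; ring⟩
  · obtain ⟨h1, h2, h3, h4⟩ := keyA_props p.1 p.2 hx hy
    exact ⟨le_of_lt h1, fun h0 => absurd h0 (by omega), h3, h4⟩

-- uniqueness of the normal form along the cross-product relation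
lemma rep_unique (a1 b1 a2 b2 : Int)
    (n1 : 0 ≤ a1) (n2 : 0 ≤ a2)
    (z1 : a1 = 0 → b1 = 1) (z2 : a2 = 0 → b2 = 1)
    (c1 : Int.gcd a1 b1 = 1) (c2 : Int.gcd a2 b2 = 1)
    (h : a1 * b2 = a2 * b1) : a1 = a2 ∧ b1 = b2 := by
  by_cases h1 : a1 = 0
  · have hb1 := z1 h1
    have : a2 = 0 := by
      subst hb1; rw [h1] at h; simpa using h.symm
    exact ⟨by omega, by rw [hb1, z2 this]⟩
  · have h2 : a2 ≠ 0 := by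
      intro h2'
      rw [h2', zero_mul, z2 h2', mul_one] at h
      exact h1 h
    have c1' : IsCoprime a1 b1 := Int.isCoprime_iff_gcd_eq_one.mpr c1
    have c2' : IsCoprime a2 b2 := Int.isCoprime_iff_gcd_eq_one.mpr c2
    have d12 : a1 ∣ a2 := c1'.dvd_of_dvd_mul_right ⟨b2, h.symm⟩
    have d21 : a2 ∣ a1 := c2'.dvd_of_dvd_mul_right ⟨b1, h⟩
    have ha : a1 = a2 := Int.dvd_antisymm (by omega) (by omega) d12 d21
    subst ha
    exact ⟨rfl, by have := mul_left_cancel₀ h1 h.symm; omega⟩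

-- the central bridge: B's collinearity test is exactly key equality
lemma key_iff (p q : Int × Int) :
    sameLineB p q = true ↔ keyA p.2 p.1 = keyA q.2 q.1 := by
  unfold sameLineB
  by_cases hsp : p = ((0 : Int), (0 : Int)) ∨ q = ((0 : Int), (0 : Int))
  · rw [if_pos hsp]
    simp only [decide_eq_true_eq]
    constructor
    · intro h; rw [h]
    · intro h
      rcases hsp with h0 | h0 <;> rw [h0] at h ⊢
      · exact ((keyA_origin_iff q).mp (by rw [← h]; simp [keyA])).symm
      · exact (keyA_origin_iff p).mp (by rw [h]; simp [keyA])
  · rw [if_neg hsp]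
    push_neg at hsp
    obtain ⟨hp, hq⟩ := hsp
    have hpo : p.1 ≠ 0 ∨ p.2 ≠ 0 := by
      by_contra hc; push_neg at hc; exact hp (Prod.ext hc.1 hc.2)
    have hqo : q.1 ≠ 0 ∨ q.2 ≠ 0 := by
      by_contra hc; push_neg at hc; exact hq (Prod.ext hc.1 hc.2)
    obtain ⟨pn, pz, pc, pr⟩ := keyA_norm p hp
    obtain ⟨qn, qz, qc, qr⟩ := keyA_norm q hq
    set a1 := (keyA p.2 p.1).1 with ha1
    set b1 := (keyA p.2 p.1).2 with hb1
    set a2 := (keyA q.2 q.1).1 with ha2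
    set b2 := (keyA q.2 q.1).2 with hb2
    simp only [decide_eq_true_eq]
    constructor
    · intro h
      -- cross relation gives a1 * b2 = a2 * b1, then uniqueness
      have hmul : a1 * b2 = a2 * b1 := by
        by_cases hne : p.1 * q.2 = 0
        · rcases mul_eq_zero.mp hne with h0 | h0
          · -- p on the y-axis: q is too
            have hp2 : p.2 ≠ 0 := hpo.resolve_left (not_not_intro h0)
            have hb1' : b1 = 0 :=
              (mul_eq_zero.mp (by rw [← pr, h0, mul_zero] : b1 * p.2 = 0)).resolve_right hp2
            have hq1 : q.1 = 0 :=
              (mul_eq_zero.mp (by rw [← h, h0, zero_mul] : p.2 * q.1 = 0)).resolve_left hp2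
            have hq2 : q.2 ≠ 0 := hqo.resolve_left (not_not_intro hq1)
            have hb2' : b2 = 0 :=
              (mul_eq_zero.mp (by rw [← qr, hq1, mul_zero] : b2 * q.2 = 0)).resolve_right hq2
            rw [hb1', hb2', mul_zero, mul_zero]
          · -- q on the x-axis: p is too
            have hq1 : q.1 ≠ 0 := hqo.resolve_right (not_not_intro h0)
            have ha2' : a2 = 0 :=
              (mul_eq_zero.mp (by rw [qr, h0, mul_zero] : a2 * q.1 = 0)).resolve_right hq1
            have hp2 : p.2 = 0 :=
              (mul_eq_zero.mp (by rw [← h, h0, mul_zero] : p.2 * q.1 = 0)).resolve_right hq1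
            have hp1 : p.1 ≠ 0 := hpo.resolve_right (not_not_intro hp2)
            have ha1' : a1 = 0 :=
              (mul_eq_zero.mp (by rw [pr, hp2, mul_zero] : a1 * p.1 = 0)).resolve_right hp1
            rw [ha1', ha2', zero_mul, zero_mul]
        · have hcan : a1 * b2 * (p.1 * q.2) = a2 * b1 * (p.1 * q.2) := by
            calc a1 * b2 * (p.1 * q.2) = (a1 * p.1) * (b2 * q.2) := by ring
            _ = (b1 * p.2) * (a2 * q.1) := by rw [pr, ← qr]
            _ = a2 * b1 * (p.2 * q.1) := by ring
            _ = a2 * b1 * (p.1 * q.2) := by rw [← h]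
          exact mul_right_cancel₀ hne hcan
      obtain ⟨e1, e2⟩ := rep_unique a1 b1 a2 b2 pn qn pz qz pc qc hmul
      exact Prod.ext e1 e2
    · intro h
      have hk0 : ¬ (a1 = 0 ∧ b1 = 0) := by
        rintro ⟨u, v⟩
        exact hp ((keyA_origin_iff p).mp (Prod.ext u v))
      have he1 : a1 = a2 := by rw [ha1, ha2, h]
      have he2 : b1 = b2 := by rw [hb1, hb2, h]
      rw [← he1, ← he2] at qr
      -- a1 * (cross) = 0 and b1 * (cross) = 0, and (a1, b1) ≠ (0, 0)
      have h1 : a1 * (p.1 * q.2) = a1 * (p.2 * q.1) := by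
        calc a1 * (p.1 * q.2) = (a1 * p.1) * q.2 := by ring
        _ = (b1 * p.2) * q.2 := by rw [pr]
        _ = p.2 * (b1 * q.2) := by ring
        _ = p.2 * (a1 * q.1) := by rw [← qr]
        _ = a1 * (p.2 * q.1) := by ring
      have h2 : b1 * (p.1 * q.2) = b1 * (p.2 * q.1) := by
        calc b1 * (p.1 * q.2) = p.1 * (b1 * q.2) := by ring
        _ = p.1 * (a1 * q.1) := by rw [← qr]
        _ = (a1 * p.1) * q.1 := by ring
        _ = (b1 * p.2) * q.1 := by rw [pr]
        _ = b1 * (p.2 * q.1) := by ring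
      rcases (by tauto : a1 ≠ 0 ∨ b1 ≠ 0) with hne | hne
      · exact mul_left_cancel₀ hne h1
      · exact mul_left_cancel₀ hne h2

-- B's inner scan over the already-seen prefix is membership of the key in A's set
lemma any_iff (seen : List (Int × Int)) (s : PySem.Set (Int × Int))
    (hinv : ∀ k, k ∈ s ↔ ∃ q ∈ seen, k = keyA q.2 q.1) (p : Int × Int) :
    (seen.any (fun q => sameLineB q p)) = true ↔ keyA p.2 p.1 ∈ s := by
  rw [List.any_eq_true, hinv]
  constructor
  · rintro ⟨q, hq, hsame⟩
    exact ⟨q, hq, ((key_iff q p).mp hsame).symm⟩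
  · rintro ⟨q, hq, hk⟩
    exact ⟨q, hq, (key_iff q p).mpr hk.symm⟩

-- the loop invariant: B's counter is the length of A's set of keys
lemma loop_eq : ∀ (l seen : List (Int × Int)) (s : PySem.Set (Int × Int)),
    (∀ k, k ∈ s ↔ ∃ q ∈ seen, k = keyA q.2 q.1) →
    (l.foldl (fun (st : Int × List (Int × Int)) p =>
        (if st.2.any (fun q => sameLineB q p) then st.1 else st.1 + 1, st.2 ++ [p]))
      ((s.length : Int), seen)).1
    = ((l.foldl (fun s p => PySem.Set.add s (keyA p.2 p.1)) s).length : Int) := by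
  intro l
  induction l with
  | nil => intro seen s _; simp
  | cons p t ih =>
    intro seen s hinv
    simp only [List.foldl_cons]
    by_cases hmem : keyA p.2 p.1 ∈ s
    · rw [if_pos ((any_iff seen s hinv p).mpr hmem), PySem.Set.add_of_mem hmem]
      refine ih (seen ++ [p]) s ?_
      intro k
      rw [hinv]
      constructor
      · rintro ⟨q, hq, rfl⟩; exact ⟨q, by simp [hq], rfl⟩
      · rintro ⟨q, hq, rfl⟩
        rcases List.mem_append.mp hq with hq | hq
        · exact ⟨q, hq, rfl⟩
        · simp at hq; subst hq
          obtain ⟨q', hq', hk⟩ := (hinv _).mp hmem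
          exact ⟨q', hq', hk⟩
    · rw [if_neg (by rw [any_iff seen s hinv p]; exact hmem), PySem.Set.add_of_not_mem hmem]
      have hlen : (s.length : Int) + 1
          = (((s ++ [keyA p.2 p.1]) : List (Int × Int)).length : Int) := by simp
      rw [hlen]
      refine ih (seen ++ [p]) (s ++ [keyA p.2 p.1]) ?_
      intro k
      rw [List.mem_append, hinv]
      constructor
      · rintro (⟨q, hq, rfl⟩ | hk)
        · exact ⟨q, by simp [hq], rfl⟩
        · simp at hk; subst hk; exact ⟨p, by simp, rfl⟩
      · rintro ⟨q, hq, rfl⟩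
        rcases List.mem_append.mp hq with hq | hq
        · exact Or.inl ⟨q, hq, rfl⟩
        · simp at hq; subst hq; exact Or.inr (by simp)

-- the set A builds contains (0,0) iff the origin occurs among the points
lemma contains_origin_iff (points : List (Int × Int)) :
    PySem.Set.contains
      (points.foldl (fun s p => PySem.Set.add s (keyA p.2 p.1)) PySem.Set.empty)
      ((0 : Int), (0 : Int)) = true
    ↔ ((0 : Int), (0 : Int)) ∈ points := by
  rw [PySem.Set.contains_iff, PySem.Set.mem_foldl_add]
  constructor
  · rintro (h | ⟨b, hb, hk⟩)
    · simp [PySem.Set.empty] at h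
    · have := (keyA_origin_iff b).mp hk.symm
      rwa [← this]
  · intro h
    exact Or.inr ⟨_, h, ((keyA_origin_iff _).mpr rfl).symm⟩

-- ===== VERDICT (by name: the statement is the Claim_ definition above) =====
theorem getNumLines_spec : Claim_equal_getNumLines := by
  intro points _
  show getNumLines points = getNumLines_alt points
  simp only [getNumLines, getNumLines_alt]
  have hloop : (points.foldl (fun (st : Int × List (Int × Int)) p =>
        (if st.2.any (fun q => sameLineB q p) then st.1 else st.1 + 1, st.2 ++ [p]))
      ((0 : Int), ([] : List (Int × Int)))).1
      = ((points.foldl (fun s p => PySem.Set.add s (keyA p.2 p.1)) PySem.Set.empty).length : Int) :=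
    loop_eq points [] PySem.Set.empty (by simp [PySem.Set.empty])
  have hc := contains_origin_iff points
  have hlen : PySem.Set.len
      (points.foldl (fun s p => PySem.Set.add s (keyA p.2 p.1)) PySem.Set.empty)
    = ((points.foldl (fun s p => PySem.Set.add s (keyA p.2 p.1)) PySem.Set.empty).length : Int) := by
    simp [PySem.Set.len]
  rw [hloop, hlen]
  by_cases hz : ((0 : Int), (0 : Int)) ∈ points
  · simp only [hc, hz]
  · simp only [hc, hz]
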